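-- pv_equiv track=rewrite | github.com/dfish13/project-euler | solutions/prob62.py | num2tup
-- ===== SOURCE A (Python) =====
-- def num2tup(n):
--     h = dict()
--     for d in str(n):
--         h[int(d)] = h.get(int(d), 0) + 1
--     t = []
--     for i in sorted(h.items(), key=lambda x: x[0]):
--         t += i
--     return tuple(t)
-- ===== SOURCE B (Python) =====
-- from itertools import groupby
--
-- def num2tup(n):
--     out = []
--     for k, g in groupby(sorted(int(d) for d in str(n))):
--         out.append(k)
--         out.append(sum(1 for _ in g))
--     return tuple(out)
-- ===== Notes on version B (the rewrite author's own statement) =====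
-- stated objective: alternative
-- what changed: Replaces A's hash-map digit counting plus sorting of (digit,count) items by sorting the digit list itself and emitting (digit,run-length) pairs with itertools.groupby.
import Mathlib
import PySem

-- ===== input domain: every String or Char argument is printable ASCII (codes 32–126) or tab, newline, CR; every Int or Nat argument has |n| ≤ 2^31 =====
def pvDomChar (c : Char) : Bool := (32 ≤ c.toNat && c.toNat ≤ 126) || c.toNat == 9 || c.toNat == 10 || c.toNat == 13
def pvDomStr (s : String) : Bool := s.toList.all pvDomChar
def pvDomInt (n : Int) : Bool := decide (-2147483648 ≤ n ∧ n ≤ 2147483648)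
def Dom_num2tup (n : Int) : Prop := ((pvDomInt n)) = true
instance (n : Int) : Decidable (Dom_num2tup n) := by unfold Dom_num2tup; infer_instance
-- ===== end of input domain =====

-- B replaces A's dict-based digit counting (then sorting the (digit,count) items)
-- by sorting the digit list and run-length grouping it; an alternative algorithm, not claimed faster.


-- int(d) for a one-character string d (exact via PySem.Int.ofChars?; the getD 0 default is
-- never reached inside Pre_, where every character of str(n) is a digit)
def pvDig (c : Char) : Int := (PySem.Int.ofChars? [c]).getD 0

-- ===== PORT A =====
def num2tup (n : Int) : List Int :=
  let h := (PySem.Int.toChars n).foldl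
    (fun d c => d.insert (pvDig c) (d.getD (pvDig c) 0 + 1)) PySem.Dict.empty
  (PySem.List.sorted h.items (fun x => x.1) false).foldl (fun t i => t ++ [i.1, i.2]) []

-- ===== PORT B =====
-- the groupby loop: each iteration emits the key and the run length of one maximal run
def rleGroup : List Int → List Int
  | [] => []
  | x :: xs =>
      x :: (((xs.takeWhile (· == x)).length : Int) + 1) :: rleGroup (xs.dropWhile (· == x))
termination_by l => l.length
decreasing_by
  have := (List.dropWhile_sublist (l := xs) (p := (· == x))).length_le
  simp only [List.length_cons]
  omega

def num2tup_alt (n : Int) : List Int :=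
  rleGroup (PySem.List.sorted ((PySem.Int.toChars n).map pvDig) (fun x => x) false)

-- ===== PRECONDITION & SPEC =====
-- Pre_ excludes n < 0, where str(n) starts with '-' and int('-') raises ValueError in both A and B.
def Pre_num2tup (n : Int) : Prop := 0 ≤ n
instance (n : Int) : Decidable (Pre_num2tup n) := by unfold Pre_num2tup; infer_instance
def pvWitness_num2tup : Int := (344)
def Spec_num2tup (n : Int) (out : List Int) : Prop := out = num2tup_alt n
instance (n : Int) (out : List Int) : Decidable (Spec_num2tup n out) := by unfold Spec_num2tup; infer_instance

-- ===== CLAIM (what is proved, stated in full; the proofs are below) =====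
def Claim_equal_num2tup : Prop := ∀ (n : Int), Dom_num2tup n → Pre_num2tup n → Spec_num2tup n (num2tup n)

-- ===== LEMMAS AND PROOFS =====

-- takeWhile/dropWhile across a block of equal elements followed by elements ≠ k
theorem takeWhile_replicate_append (k : Int) (n : Nat) (R : List Int) (h : ∀ y ∈ R, y ≠ k) :
    (List.replicate n k ++ R).takeWhile (· == k) = List.replicate n k := by
  induction n with
  | zero =>
      simp only [List.replicate, List.nil_append]
      cases R with
      | nil => rfl
      | cons y R' =>
          have hy : (y == k) = false := by simpa using h y (by simp)
          simp [List.takeWhile, hy]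
  | succ m ih => simp [List.replicate_succ, ih]

theorem dropWhile_replicate_append (k : Int) (n : Nat) (R : List Int) (h : ∀ y ∈ R, y ≠ k) :
    (List.replicate n k ++ R).dropWhile (· == k) = R := by
  induction n with
  | zero =>
      simp only [List.replicate, List.nil_append]
      cases R with
      | nil => rfl
      | cons y R' =>
          have hy : (y == k) = false := by simpa using h y (by simp)
          simp [List.dropWhile, hy]
  | succ m ih => simp [List.replicate_succ, ih]

-- rleGroup of a concatenation of nonempty runs over distinct keys
theorem rleGroup_flatMap_replicate (c : Int → Nat) :
    ∀ (K : List Int), K.Nodup → (∀ k ∈ K, 0 < c k) →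
    rleGroup (K.flatMap (fun k => List.replicate (c k) k)) =
      K.flatMap (fun k => [k, (c k : Int)]) := by
  intro K
  induction K with
  | nil => intro _ _; simp [rleGroup]
  | cons k K' ih =>
      intro hnd hc
      have hk : k ∉ K' := (List.nodup_cons.mp hnd).1
      have hnd' : K'.Nodup := (List.nodup_cons.mp hnd).2
      obtain ⟨m, hm⟩ : ∃ m, c k = m + 1 := by
        have := hc k (by simp); exact ⟨c k - 1, by omega⟩
      have hrest : ∀ y ∈ K'.flatMap (fun k => List.replicate (c k) k), y ≠ k := by
        intro y hy
        obtain ⟨k', hk', hy'⟩ := List.mem_flatMap.mp hy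
        have : y = k' := List.eq_of_mem_replicate hy'
        subst this
        exact fun h => hk (h ▸ hk')
      have hsplit : (k :: K').flatMap (fun k => List.replicate (c k) k)
          = k :: (List.replicate m k ++ K'.flatMap (fun k => List.replicate (c k) k)) := by
        simp [List.flatMap_cons, hm, List.replicate_succ]
      rw [hsplit, rleGroup,
        takeWhile_replicate_append k m _ hrest,
        dropWhile_replicate_append k m _ hrest,
        ih hnd' (fun x hx => hc x (by simp [hx]))]
      simp [hm]

-- count of v in a flatMap of replicates over a Nodup key list
theorem count_flatMap_replicate (c : Int → Nat) (K : List Int) (hnd : K.Nodup) (v : Int) :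
    (K.flatMap (fun k => List.replicate (c k) k)).count v = if v ∈ K then c v else 0 := by
  induction K with
  | nil => simp
  | cons k K' ih =>
      have hk : k ∉ K' := (List.nodup_cons.mp hnd).1
      have ih' := ih (List.nodup_cons.mp hnd).2
      by_cases hv : v = k
      · subst hv
        simp [List.flatMap_cons, List.count_append, ih', hk]
      · simp [List.flatMap_cons, List.count_append, List.count_replicate, ih', hv]
        exact fun h => absurd h.symm hv

theorem pairwise_flatMap_replicate (c : Int → Nat) (K : List Int) (h : K.Pairwise (· < ·)) :
    (K.flatMap (fun k => List.replicate (c k) k)).Pairwise (· ≤ ·) := by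
  induction K with
  | nil => simp
  | cons k K' ih =>
      have hlt : ∀ k' ∈ K', k < k' := (List.pairwise_cons.mp h).1
      have ih' := ih (List.pairwise_cons.mp h).2
      rw [List.flatMap_cons]
      refine List.pairwise_append.mpr ⟨?_, ih', ?_⟩
      · exact List.pairwise_replicate.mpr (Or.inr (le_refl k))
      · intro a ha b hb
        have hak : a = k := List.eq_of_mem_replicate ha
        obtain ⟨k', hk', hb'⟩ := List.mem_flatMap.mp hb
        have hbk : b = k' := List.eq_of_mem_replicate hb'
        subst hak
        rw [hbk]
        exact le_of_lt (hlt k' hk')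

-- ===== VERDICT (by name: the statement is the Claim_ definition above) =====
theorem num2tup_spec : Claim_equal_num2tup := by
  intro n _ _
  unfold Spec_num2tup num2tup num2tup_alt
  set ds : List Int := (PySem.Int.toChars n).map pvDig with hds
  set K : List Int := PySem.List.sorted (PySem.Set.ofList ds) (fun x => x) false with hK
  have hKperm : K.Perm (PySem.Set.ofList ds) := PySem.List.sorted_perm _ _ _
  have hKlt : K.Pairwise (· < ·) := PySem.List.sorted_ofList_pairwise_lt ds
  have hKnd : K.Nodup := hKlt.imp ne_of_lt
  have hKmem : ∀ x, x ∈ K ↔ x ∈ ds := by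
    intro x
    rw [PySem.List.mem_sorted, PySem.Set.mem_ofList]
  -- A side
  have hA : ((PySem.Int.toChars n).foldl
      (fun d c => d.insert (pvDig c) (d.getD (pvDig c) 0 + 1)) PySem.Dict.empty)
      = PySem.Dict.counter ds := by
    rw [hds, ← PySem.Dict.foldl_insert_getD_add_one_eq_counter, List.foldl_map]
  rw [hA]
  dsimp only
  have hsortedItems : PySem.List.sorted (PySem.Dict.counter ds).items (fun x => x.1) false
      = K.map (fun k => (k, (ds.count k : Int))) := by
    apply PySem.List.sorted_eq_of_perm_of_pairwise_lt
    · rw [PySem.Dict.items_counter]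
      exact hKperm.map _
    · exact List.pairwise_map.mpr hKlt
  rw [hsortedItems, PySem.List.foldl_append_eq_flatMap, List.nil_append]
  -- B side
  have hsortedDs : PySem.List.sorted ds (fun x => x) false
      = K.flatMap (fun k => List.replicate (ds.count k) k) := by
    apply PySem.List.sorted_id_eq_of_perm_of_pairwise
    · rw [List.perm_iff_count]
      intro v
      rw [count_flatMap_replicate _ _ hKnd]
      by_cases hv : v ∈ ds
      · simp [(hKmem v).mpr hv]
      · have hvK : v ∉ K := fun h => hv ((hKmem v).mp h)
        simp [hvK, List.count_eq_zero_of_not_mem hv]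
    · exact pairwise_flatMap_replicate _ _ hKlt
  rw [hsortedDs,
    rleGroup_flatMap_replicate _ K hKnd
      (fun k hk => List.count_pos_iff.mpr ((hKmem k).mp hk))]
  rw [List.flatMap_map]
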